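-- pv_equiv track=rewrite | github.com/E105D104U125/PROJECTS | Artificial Intelligence/P2/2301_p2_07_aliaga_terres.py | valorEsquinas
-- ===== SOURCE A (Python) =====
-- def valorEsquinas(board, label):
--   L = [(1,8), (1,1), (8,1), (8,8)]
--   L2 = [(2,7), (2,2), (7,2), (7,7)]
--   L3 = [(1,7), (1,2), (8,2), (8,7)]
--   L4 = [(2,8), (2,1), (7,1), (7,8)]
--   n = 0
--   for clave in L:
--     index = L.index(clave)
--     clave1, clave2, clave3 = L2[index], L3[index], L4[index]
--     if clave in board.keys():
--       if board[clave] == label: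
--         n = n + 99
--     if clave1 in board.keys():
--       if board[clave1] == label:
--         n = n - 24
--     if (clave2 in board.keys() and board[clave2] == label) or (clave3 in board.keys() and  board[clave3] == label):
--         n = n - 8
--
--   return n
-- ===== SOURCE B (Python) =====
-- def valorEsquinas(board, label):
--   weight = {(1, 8): 99, (1, 1): 99, (8, 1): 99, (8, 8): 99,
--             (2, 7): -24, (2, 2): -24, (7, 2): -24, (7, 7): -24,
--             (1, 7): -8, (2, 8): -8, (1, 2): -8, (2, 1): -8,
--             (8, 2): -8, (7, 1): -8, (8, 7): -8, (7, 8): -8}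
--   pairs = [((1, 7), (2, 8)), ((1, 2), (2, 1)), ((8, 2), (7, 1)), ((8, 7), (7, 8))]
--   matched = [cell for cell, value in board.items() if value == label]
--   total = sum(weight.get(cell, 0) for cell in matched)
--   # each edge pair was charged -8 per matching cell; add back +8 when both match,
--   # so the pair contributes -8 once (inclusion-exclusion)
--   total += 8 * sum(1 for a, b in pairs if a in matched and b in matched)
--   return total
-- ===== Notes on version B (the rewrite author's own statement) =====
-- stated objective: alternative
-- what changed: Instead of A's loop over the four corners with L.index self-lookups and guarded board lookups per corner, B makes one pass over the board items collecting the cells whose value matches the label, sums a precomputed per-cell weight table over them (edge cells weighted -8 each), and adds back +8 per edge pair where both cells match (inclusion-exclusion), so the pair is charged once; Pre_ requires distinct keys in the association list, the invariant every Python dict satisfies.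
import Mathlib
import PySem

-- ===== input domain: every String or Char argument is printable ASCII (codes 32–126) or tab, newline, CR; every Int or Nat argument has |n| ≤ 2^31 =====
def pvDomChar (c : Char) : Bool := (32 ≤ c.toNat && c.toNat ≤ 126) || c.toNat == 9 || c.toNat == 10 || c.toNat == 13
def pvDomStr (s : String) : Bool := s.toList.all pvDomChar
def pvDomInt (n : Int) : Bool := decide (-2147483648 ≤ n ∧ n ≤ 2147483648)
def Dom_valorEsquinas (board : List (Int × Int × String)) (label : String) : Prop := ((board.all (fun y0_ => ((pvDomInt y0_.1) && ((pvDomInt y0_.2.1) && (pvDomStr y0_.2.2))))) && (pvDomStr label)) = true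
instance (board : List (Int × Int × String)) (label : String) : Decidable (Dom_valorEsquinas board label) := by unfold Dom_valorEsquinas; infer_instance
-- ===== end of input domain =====

-- B replaces A's corner loop (with its L.index self-lookup and per-corner board lookups) by one
-- pass over the board items against a precomputed weight table, with an inclusion-exclusion
-- correction for the edge pairs; same cost class, a different traversal.

-- dict lookup on the association list (first match), shared dict primitive of both ports
def dLookup (board : List (Int × Int × String)) (k : Int × Int) : Option String :=
  match board with
  | [] => none
  | (a, b, v) :: rest => if a = k.1 ∧ b = k.2 then some v else dLookup rest k

-- ===== PORT A =====
-- port of `clave in board.keys() and board[clave] == label` (used in A's third `if`)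
def condA (board : List (Int × Int × String)) (k : Int × Int) (label : String) : Bool :=
  match dLookup board k with
  | some v => v == label
  | none => false

def valorEsquinas (board : List (Int × Int × String)) (label : String) : Int :=
  let L : List (Int × Int) := [(1, 8), (1, 1), (8, 1), (8, 8)]
  let L2 : List (Int × Int) := [(2, 7), (2, 2), (7, 2), (7, 7)]
  let L3 : List (Int × Int) := [(1, 7), (1, 2), (8, 2), (8, 7)]
  let L4 : List (Int × Int) := [(2, 8), (2, 1), (7, 1), (7, 8)]
  L.foldl (fun n clave =>
    let index := (PySem.List.index? L clave).getD 0
    let clave1 := (PySem.List.pyGet? L2 index).getD (0, 0)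
    let clave2 := (PySem.List.pyGet? L3 index).getD (0, 0)
    let clave3 := (PySem.List.pyGet? L4 index).getD (0, 0)
    let n := match dLookup board clave with
      | some v => if v == label then n + 99 else n
      | none => n
    let n := match dLookup board clave1 with
      | some v => if v == label then n - 24 else n
      | none => n
    let n := if condA board clave2 label || condA board clave3 label then n - 8 else n
    n) 0

-- ===== PORT B =====
-- `weight.get(cell, 0)`: first-match dict lookup with default 0
def wGet (W : List ((Int × Int) × Int)) (c : Int × Int) : Int :=
  match W with
  | [] => 0
  | (k, v) :: r => if c = k then v else wGet r c

def weightTable : List ((Int × Int) × Int) :=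
  [((1, 8), 99), ((1, 1), 99), ((8, 1), 99), ((8, 8), 99),
   ((2, 7), -24), ((2, 2), -24), ((7, 2), -24), ((7, 7), -24),
   ((1, 7), -8), ((2, 8), -8), ((1, 2), -8), ((2, 1), -8),
   ((8, 2), -8), ((7, 1), -8), ((8, 7), -8), ((7, 8), -8)]

def valorEsquinas_alt (board : List (Int × Int × String)) (label : String) : Int :=
  let pairs : List ((Int × Int) × (Int × Int)) :=
    [((1, 7), (2, 8)), ((1, 2), (2, 1)), ((8, 2), (7, 1)), ((8, 7), (7, 8))]
  let matched : List (Int × Int) :=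
    (board.filter (fun p => p.2.2 == label)).map (fun p => (p.1, p.2.1))
  let total : Int := matched.foldl (fun s c => s + wGet weightTable c) 0
  total + 8 * ((pairs.filter (fun ab => matched.contains ab.1 && matched.contains ab.2)).length : Int)

-- ===== PRECONDITION & SPEC =====
-- Pre_ excludes association lists with duplicate keys: they do not represent any Python dict
-- (A's parameter is a dict), so neither behaviour there is specified.
def Pre_valorEsquinas (board : List (Int × Int × String)) (label : String) : Prop :=
  (board.map (fun p => (p.1, p.2.1))).Nodup
instance (board : List (Int × Int × String)) (label : String) : Decidable (Pre_valorEsquinas board label) := by unfold Pre_valorEsquinas; infer_instance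

def pvWitness_valorEsquinas : (List (Int × Int × String)) × String := ([(1, 8, "x"), (2, 8, "x")], "x")

def Spec_valorEsquinas (board : List (Int × Int × String)) (label : String) (out : Int) : Prop := out = valorEsquinas_alt board label
instance (board : List (Int × Int × String)) (label : String) (out : Int) : Decidable (Spec_valorEsquinas board label out) := by unfold Spec_valorEsquinas; infer_instance

-- ===== CLAIM (what is proved, stated in full; the proofs are below) =====
def Claim_equal_valorEsquinas : Prop := ∀ (board : List (Int × Int × String)) (label : String), Dom_valorEsquinas board label → Pre_valorEsquinas board label → Spec_valorEsquinas board label (valorEsquinas board label)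

-- ===== LEMMAS AND PROOFS =====
def pvInd (b : Bool) : Int := if b then 1 else 0

-- the matched-cells list of B, as a named function for the proofs
def mCells (board : List (Int × Int × String)) (label : String) : List (Int × Int) :=
  (board.filter (fun p => p.2.2 == label)).map (fun p => (p.1, p.2.1))

-- A's loop body at one corner index (proof helper; A's port itself is the foldl above)
def bodyStep (board : List (Int × Int × String)) (label : String) (n : Int)
    (c c1 c2 c3 : Int × Int) : Int :=
  let n := match dLookup board c with
    | some v => if v == label then n + 99 else n
    | none => n
  let n := match dLookup board c1 with
    | some v => if v == label then n - 24 else n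
    | none => n
  if condA board c2 label || condA board c3 label then n - 8 else n

theorem A_unfold (board : List (Int × Int × String)) (label : String) :
    valorEsquinas board label =
      bodyStep board label
        (bodyStep board label
          (bodyStep board label
            (bodyStep board label 0 (1, 8) (2, 7) (1, 7) (2, 8))
            (1, 1) (2, 2) (1, 2) (2, 1))
          (8, 1) (7, 2) (8, 2) (7, 1))
        (8, 8) (7, 7) (8, 7) (7, 8) := by
  rfl

theorem condA_eq (board : List (Int × Int × String)) (k : Int × Int) (label : String) :
    condA board k label = (dLookup board k == some label) := by
  unfold condA
  cases dLookup board k <;> simp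

theorem matchAdd (o : Option String) (label : String) (n k : Int) :
    (match o with
      | some v => if v == label then n + k else n
      | none => n) = n + k * pvInd (o == some label) := by
  cases o with
  | none => simp [pvInd]
  | some v => by_cases h : (v == label) = true <;> simp [pvInd, h]

theorem matchSub (o : Option String) (label : String) (n k : Int) :
    (match o with
      | some v => if v == label then n - k else n
      | none => n) = n - k * pvInd (o == some label) := by
  cases o with
  | none => simp [pvInd]
  | some v => by_cases h : (v == label) = true <;> simp [pvInd, h]

theorem bodyStep_eq (board : List (Int × Int × String)) (label : String) (n : Int)
    (c c1 c2 c3 : Int × Int) :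
    bodyStep board label n c c1 c2 c3 =
      n + 99 * pvInd (dLookup board c == some label)
        - 24 * pvInd (dLookup board c1 == some label)
        - 8 * pvInd ((dLookup board c2 == some label) || (dLookup board c3 == some label)) := by
  unfold bodyStep
  simp only [matchAdd, matchSub, condA_eq]
  cases hb : (dLookup board c2 == some label) || (dLookup board c3 == some label) <;>
    simp [pvInd]

theorem pvInd_or (a b : Bool) :
    pvInd (a || b) = pvInd a + pvInd b - pvInd (a && b) := by
  cases a <;> cases b <;> simp [pvInd]

theorem foldl_eq_sum (f : (Int × Int) → Int) (l : List (Int × Int)) (a : Int) :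
    l.foldl (fun s c => s + f c) a = a + (l.map f).sum := by
  induction l generalizing a with
  | nil => simp
  | cons c t ih => simp [List.foldl_cons, ih]; ring

theorem contains_false_of_not_mem {l : List (Int × Int)} {c : Int × Int} (h : c ∉ l) :
    l.contains c = false := by
  simpa using h

theorem map_ite_sum (g : (Int × Int) → Int) (k : Int × Int) (v : Int)
    (m : List (Int × Int)) (hm : m.Nodup) :
    (m.map (fun c => if c = k then v else g c)).sum
      = (m.map g).sum + (v - g k) * pvInd (m.contains k) := by
  induction m with
  | nil => simp [pvInd]
  | cons c t ih =>
    obtain ⟨hct, hnd⟩ := List.nodup_cons.mp hm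
    simp only [List.map_cons, List.sum_cons]
    rw [ih hnd]
    by_cases hck : c = k
    · subst hck
      have h1 : t.contains c = false := contains_false_of_not_mem hct
      have h2 : (c :: t).contains c = true := by simp
      rw [h1, h2]
      simp [pvInd]
      ring
    · have hkc : ¬ k = c := fun h => hck h.symm
      have h2 : (c :: t).contains k = t.contains k := by
        rw [List.contains_cons]
        simp [hkc]
      rw [h2]
      simp [hck]
      ring

theorem wGet_not_mem (W : List ((Int × Int) × Int)) (k : Int × Int)
    (h : k ∉ W.map Prod.fst) : wGet W k = 0 := by
  induction W with
  | nil => rfl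
  | cons p r ih =>
    simp only [List.map_cons, List.mem_cons] at h
    push_neg at h
    rw [show wGet (p :: r) k = if k = p.1 then p.2 else wGet r k from by cases p; rfl]
    rw [if_neg h.1]
    exact ih h.2

theorem sum_wGet (W : List ((Int × Int) × Int)) (hW : (W.map Prod.fst).Nodup)
    (m : List (Int × Int)) (hm : m.Nodup) :
    (m.map (wGet W)).sum = (W.map (fun kv => kv.2 * pvInd (m.contains kv.1))).sum := by
  induction W with
  | nil =>
    simp [show wGet [] = fun _ => (0 : Int) from rfl]
  | cons p r ih =>
    obtain ⟨k, v⟩ := p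
    obtain ⟨hk, hr⟩ := List.nodup_cons.mp hW
    have hstep : (m.map (wGet ((k, v) :: r))).sum
        = (m.map (wGet r)).sum + (v - wGet r k) * pvInd (m.contains k) := by
      have : (m.map (wGet ((k, v) :: r))) = m.map (fun c => if c = k then v else wGet r c) := by
        apply List.map_congr_left; intro c _; rfl
      rw [this, map_ite_sum _ _ _ _ hm]
    rw [hstep, wGet_not_mem r k hk, ih hr]
    simp
    ring

theorem mCells_sublist_keys (board : List (Int × Int × String)) (label : String) :
    (mCells board label).Sublist (board.map (fun p => (p.1, p.2.1))) := by
  unfold mCells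
  exact List.Sublist.map _ List.filter_sublist

theorem mCells_nodup (board : List (Int × Int × String)) (label : String)
    (h : (board.map (fun p => (p.1, p.2.1))).Nodup) : (mCells board label).Nodup :=
  (mCells_sublist_keys board label).nodup h

theorem lookup_eq_contains (board : List (Int × Int × String)) (label : String)
    (c : Int × Int) (h : (board.map (fun p => (p.1, p.2.1))).Nodup) :
    (dLookup board c == some label) = (mCells board label).contains c := by
  induction board with
  | nil => simp [dLookup, mCells]
  | cons p rest ih =>
    obtain ⟨a, b, v⟩ := p
    simp only [List.map_cons] at h
    obtain ⟨hk, hrest⟩ := List.nodup_cons.mp h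
    have hd : dLookup ((a, b, v) :: rest) c
        = if a = c.1 ∧ b = c.2 then some v else dLookup rest c := rfl
    have hm : mCells ((a, b, v) :: rest) label
        = if v == label then (a, b) :: mCells rest label else mCells rest label := by
      simp only [mCells, List.filter_cons]
      by_cases hv : (v == label) = true <;> simp [hv]
    by_cases hc : a = c.1 ∧ b = c.2
    · have hcc : c = (a, b) := by
        obtain ⟨h1, h2⟩ := hc
        exact Prod.ext h1.symm h2.symm
      have hnot : (a, b) ∉ mCells rest label :=
        fun hmem => hk ((mCells_sublist_keys rest label).subset hmem)
      rw [hd, if_pos hc, hm, hcc]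
      by_cases hv : (v == label) = true <;> simp [hv, hnot]
    · have hne : ¬ c = (a, b) := by
        intro he; subst he; exact hc ⟨rfl, rfl⟩
      rw [hd, if_neg hc, hm, ih hrest]
      by_cases hv : (v == label) = true <;>
        simp [hv, List.contains_cons, hne]

theorem valorEsquinas_spec : Claim_equal_valorEsquinas := by
  intro board label _ hpre
  unfold Spec_valorEsquinas valorEsquinas_alt
  rw [A_unfold]
  rw [bodyStep_eq, bodyStep_eq, bodyStep_eq, bodyStep_eq]
  have hnodup : (mCells board label).Nodup := mCells_nodup board label hpre
  have hsum := sum_wGet weightTable (by decide) (mCells board label) hnodup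
  show _ = (mCells board label).foldl (fun s c => s + wGet weightTable c) 0 + _
  rw [foldl_eq_sum, hsum]
  simp only [weightTable, List.map_cons, List.map_nil, List.sum_cons, List.sum_nil]
  simp only [lookup_eq_contains board label _ hpre]
  -- expand the 4-element pair filter length into indicators
  have hfl : ∀ (f : ((Int × Int) × (Int × Int)) → Bool) (a b c d : (Int × Int) × (Int × Int)),
      (((List.filter f [a, b, c, d]).length : Int))
        = pvInd (f a) + pvInd (f b) + pvInd (f c) + pvInd (f d) := by
    intro f a b c d
    cases ha : f a <;> cases hb : f b <;> cases hc : f c <;> cases hd : f d <;>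
      simp [ha, hb, hc, hd, pvInd]
  rw [hfl]
  simp only [pvInd_or]
  simp only [show (List.map (fun p => ((p : Int × Int × String).1, p.2.1))
      (List.filter (fun p => p.2.2 == label) board)) = mCells board label from rfl]
  ring
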